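-- pv_equiv track=rewrite | github.com/Piku74/custom-wordlist-generator | word_gen3.py | generate_big_wordlist
-- ===== SOURCE A (Python) =====
-- import itertools
--
-- def all_variants(word):
--     return [word.lower(), word.upper(), word.capitalize()]
--
-- def generate_big_wordlist(words, extras, max_words=4):
--     base_words = []
--     for word in words:
--         base_words.extend(all_variants(word))
--
--     wordlist = set()
--
--     for r in range(1, max_words + 1):
--         for combo in itertools.product(base_words, repeat=r):
--             base = ''.join(combo)
--             if 6 <= len(base) <= 20:
--                 wordlist.add(base)
--                 for ext in extras:
--                     wordlist.add(base + ext)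
--                     wordlist.add(ext + base)
--
--     return wordlist
-- ===== SOURCE B (Python) =====
-- def all_variants(word):
--     return [word.lower(), word.upper(), word.capitalize()]
--
-- def generate_big_wordlist(words, extras, max_words=4):
--     base_words = []
--     for word in words:
--         base_words.extend(all_variants(word))
--
--     wordlist = set()
--     # breadth-first over combination length: keep only partial strings of at most
--     # 20 characters (lengths only grow, so a longer prefix can never re-enter the
--     # 6..20 window), then register every surviving string in the window.
--     frontier = ['']
--     for _ in range(max_words):
--         frontier = [p + w for p in frontier for w in base_words if len(p + w) <= 20]
--         for s in frontier:
--             if 6 <= len(s):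
--                 wordlist.add(s)
--                 for ext in extras:
--                     wordlist.add(s + ext)
--                     wordlist.add(ext + s)
--     return wordlist
-- ===== Notes on version B (the rewrite author's own statement) =====
-- stated objective: alternative
-- what changed: A enumerates the full cartesian product base_words^r for every r=1..max_words and joins each tuple; B grows combinations breadth-first, keeping a frontier of partial strings and pruning every prefix longer than 20 characters (lengths only grow, so no extension of such a prefix can re-enter the 6..20 length window).
import Mathlib
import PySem

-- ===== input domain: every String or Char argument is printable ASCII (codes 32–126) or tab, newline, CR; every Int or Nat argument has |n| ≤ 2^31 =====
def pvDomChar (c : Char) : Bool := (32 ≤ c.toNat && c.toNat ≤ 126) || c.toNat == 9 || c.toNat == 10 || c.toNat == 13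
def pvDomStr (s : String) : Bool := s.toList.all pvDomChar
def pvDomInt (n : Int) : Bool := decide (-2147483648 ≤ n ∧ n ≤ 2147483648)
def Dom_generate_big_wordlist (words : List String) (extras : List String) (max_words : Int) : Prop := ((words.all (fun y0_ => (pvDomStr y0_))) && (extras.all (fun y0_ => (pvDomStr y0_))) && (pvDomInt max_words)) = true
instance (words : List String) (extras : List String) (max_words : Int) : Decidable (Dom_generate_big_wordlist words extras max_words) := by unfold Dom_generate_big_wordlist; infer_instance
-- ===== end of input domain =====

-- B replaces A's full cartesian-product enumeration by a breadth-first frontier that prunes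
-- every prefix longer than 20 characters (lengths only grow, so no extension of such a prefix
-- can re-enter the 6..20 length window); the returned set is proved identical.


-- ===== PORT A =====
-- str.capitalize(): first char upper-cased, rest lower-cased — hand port, exact on ASCII (the stated domain)
def pyCapitalize (word : String) : String :=
  match word.toList with
  | [] => String.ofList []
  | c :: t => String.ofList (PySem.Chars.upperChar c :: PySem.Chars.lower t)

def all_variants (word : String) : List String :=
  [PySem.Str.lower word, PySem.Str.upper word, pyCapitalize word]

-- itertools.product(l, repeat=r), leftmost component varying slowest
def pyProduct (l : List String) : Nat → List (List String)
  | 0 => [[]]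
  | n + 1 => l.flatMap (fun x => (pyProduct l n).map (x :: ·))

-- the shared add-block: wordlist.add(base); for ext in extras: add(base+ext); add(ext+base)
def addExtras (extras : List String) (wl : PySem.Set String) (s : String) : PySem.Set String :=
  extras.foldl (fun wl ext => PySem.Set.add (PySem.Set.add wl (s ++ ext)) (ext ++ s))
    (PySem.Set.add wl s)

def generate_big_wordlist (words : List String) (extras : List String) (max_words : Int) : List String :=
  let base_words := words.foldl (fun acc word => acc ++ all_variants word) []
  (PySem.List.pyRange 1 (max_words + 1) 1).foldl (fun wl r =>
    (pyProduct base_words r.toNat).foldl (fun wl combo =>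
      let base := PySem.Str.join "" combo
      if 6 ≤ PySem.Str.len base ∧ PySem.Str.len base ≤ 20 then addExtras extras wl base
      else wl) wl) PySem.Set.empty

-- ===== PORT B =====
-- frontier = [p + w for p in frontier for w in base_words if len(p + w) <= 20]
-- then: for s in frontier: if 6 <= len(s): add s and its extra-decorated variants
def bLoop (base_words extras : List String) : Nat → PySem.Set String → List String → PySem.Set String
  | 0, wl, _ => wl
  | n + 1, wl, frontier =>
    let fr := frontier.flatMap (fun p =>
      (base_words.map (fun w => p ++ w)).filter (fun s => decide (PySem.Str.len s ≤ 20)))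
    let wl := fr.foldl (fun wl s =>
      if 6 ≤ PySem.Str.len s then addExtras extras wl s else wl) wl
    bLoop base_words extras n wl fr

def generate_big_wordlist_alt (words : List String) (extras : List String) (max_words : Int) : List String :=
  let base_words := words.foldl (fun acc word => acc ++ all_variants word) []
  bLoop base_words extras max_words.toNat PySem.Set.empty [""]


-- ===== PRECONDITION & SPEC =====
def Spec_generate_big_wordlist (words : List String) (extras : List String) (max_words : Int) (out : List String) : Prop := out = generate_big_wordlist_alt words extras max_words
instance (words : List String) (extras : List String) (max_words : Int) (out : List String) : Decidable (Spec_generate_big_wordlist words extras max_words out) := by unfold Spec_generate_big_wordlist; infer_instance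

-- ===== CLAIM (what is proved, stated in full; the proofs are below) =====
def Claim_equal_generate_big_wordlist : Prop := ∀ (words : List String) (extras : List String) (max_words : Int), Dom_generate_big_wordlist words extras max_words → Spec_generate_big_wordlist words extras max_words (generate_big_wordlist words extras max_words)

-- ===== LEMMAS AND PROOFS =====

-- proof-side abbreviations
def keep (s : String) : Bool := PySem.Str.len s ≤ 20

def emitA (extras : List String) (wl : PySem.Set String) (s : String) : PySem.Set String :=
  if 6 ≤ PySem.Str.len s ∧ PySem.Str.len s ≤ 20 then addExtras extras wl s else wl

def joinAll (l : List String) (r : Nat) : List String :=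
  (pyProduct l r).map (PySem.Str.join "")

def extend1 (l : List String) (s : String) : List String := l.map (s ++ ·)

-- what A does over the levels r+1, r+2, … expressed as one chain
def aChain (base extras : List String) : Nat → List String → PySem.Set String → PySem.Set String
  | 0, _, wl => wl
  | n + 1, L, wl =>
    aChain base extras n (L.flatMap (extend1 base)) ((L.flatMap (extend1 base)).foldl (emitA extras) wl)

theorem len_nonneg (s : String) : 0 ≤ PySem.Str.len s := by
  simp [PySem.Str.len_eq]

theorem join_snoc (t : List String) (x : String) :
    PySem.Str.join "" (t ++ [x]) = PySem.Str.join "" t ++ x := by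
  have h : ∀ (ts : List (List Char)) (xs : List Char),
      List.intercalate [] (ts ++ [xs]) = List.intercalate [] ts ++ xs := by
    intro ts xs
    induction ts with
    | nil => simp [List.intercalate]
    | cons h tl ih => cases tl <;> simp_all [List.intercalate, List.intersperse]
  simp only [PySem.Str.join, PySem.Chars.join, List.map_append, List.map_cons, List.map_nil]
  have hsep : ("".toList : List Char) = [] := rfl
  rw [hsep, h, String.ofList_append, String.ofList_toList]

theorem pyProduct_snoc (l : List String) (n : Nat) :
    pyProduct l (n + 1) = (pyProduct l n).flatMap (fun t => l.map (fun x => t ++ [x])) := by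
  have hsingle : ∀ (l' : List String), l'.flatMap (fun x => [[x]]) = l'.map (fun x => [x]) := by
    intro l'
    induction l' with
    | nil => rfl
    | cons a t iht => simp [iht]
  induction n with
  | zero => simp [pyProduct, hsingle]
  | succ n ih =>
    calc pyProduct l (n + 1 + 1)
        = l.flatMap (fun x => (pyProduct l (n + 1)).map (x :: ·)) := rfl
      _ = l.flatMap (fun x =>
            ((pyProduct l n).flatMap (fun t => l.map (fun y => t ++ [y]))).map (x :: ·)) := by
          rw [ih]
      _ = (l.flatMap (fun x => (pyProduct l n).map (x :: ·))).flatMap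
            (fun t => l.map (fun y => t ++ [y])) := by
          simp only [List.map_flatMap, List.flatMap_assoc, List.flatMap_map, List.map_map,
            Function.comp_def, List.cons_append]
      _ = (pyProduct l (n + 1)).flatMap (fun t => l.map (fun y => t ++ [y])) := rfl

theorem joinAll_succ (l : List String) (n : Nat) :
    joinAll l (n + 1) = (joinAll l n).flatMap (extend1 l) := by
  unfold joinAll extend1
  rw [pyProduct_snoc]
  simp [List.map_flatMap, List.flatMap_map, List.map_map, Function.comp_def, join_snoc]




theorem dead_filter (base : List String) (p : String) (hp : keep p = false) :
    (extend1 base p).filter keep = [] := by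
  unfold extend1
  simp only [keep, decide_eq_false_iff_not, not_le] at hp
  simp only [List.filter_eq_nil_iff, List.mem_map]
  rintro s ⟨w, -, rfl⟩
  simp only [keep, decide_eq_true_eq, PySem.Str.len_append, not_le]
  have := len_nonneg w
  omega


theorem emitA_dead (extras : List String) (wl : PySem.Set String) (s : String)
    (hs : keep s = false) : emitA extras wl s = wl := by
  simp only [keep, decide_eq_false_iff_not, not_le] at hs
  unfold emitA
  rw [if_neg]
  rintro ⟨-, h2⟩
  omega

theorem flatMap_filter_inner (base : List String) (L : List String) :
    L.flatMap (fun p => (extend1 base p).filter keep)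
      = (L.flatMap (extend1 base)).filter keep := by
  induction L with
  | nil => rfl
  | cons p L ih => simp [List.flatMap_cons, List.filter_append, ih]

theorem foldl_emitB_filter (extras : List String) (L : List String) :
    ∀ (wl : PySem.Set String),
      (L.filter keep).foldl (fun wl s =>
          if 6 ≤ PySem.Str.len s then addExtras extras wl s else wl) wl
        = L.foldl (emitA extras) wl := by
  induction L with
  | nil => intro wl; rfl
  | cons s L ih =>
    intro wl
    by_cases hs : PySem.Str.len s ≤ 20
    · have hkeep : keep s = true := by
        simp only [keep]
        exact decide_eq_true hs
      simp only [List.filter_cons, hkeep, if_pos, List.foldl_cons]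
      rw [ih]
      by_cases h6 : 6 ≤ PySem.Str.len s
      · rw [if_pos h6, show emitA extras wl s = addExtras extras wl s from if_pos ⟨h6, hs⟩]
      · rw [if_neg h6, show emitA extras wl s = wl from by
          unfold emitA
          rw [if_neg]
          rintro ⟨h1, -⟩
          exact h6 h1]
    · have hkeep : keep s = false := by
        simp only [keep]
        exact decide_eq_false hs
      simp only [List.filter_cons, hkeep, Bool.false_eq_true, ite_false, List.foldl_cons]
      rw [ih, emitA_dead extras wl s hkeep]

theorem flatMap_filter_filter (base : List String) (L : List String) :
    ((L.filter keep).flatMap (extend1 base)).filter keep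
      = (L.flatMap (extend1 base)).filter keep := by
  induction L with
  | nil => rfl
  | cons p L ih =>
    by_cases hp : keep p
    · simp only [List.filter_cons, hp, if_pos, List.flatMap_cons, List.filter_append, ih]
    · have hp' : keep p = false := by simpa using hp
      simp [hp', List.flatMap_cons, List.filter_append, ih,
        dead_filter base p hp']

theorem bLoop_eq (base extras : List String) :
    ∀ (n : Nat) (L : List String) (wl : PySem.Set String),
      bLoop base extras n wl (L.filter keep) = aChain base extras n L wl := by
  intro n
  induction n with
  | zero => intro L wl; rfl
  | succ n ih =>
    intro L wl
    show bLoop base extras n _ _ = _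
    have hfr : (L.filter keep).flatMap (fun p =>
          (base.map (fun w => p ++ w)).filter (fun s => decide (PySem.Str.len s ≤ 20)))
        = (L.flatMap (extend1 base)).filter keep := by
      rw [show (fun p => (base.map (fun w => p ++ w)).filter (fun s => decide (PySem.Str.len s ≤ 20)))
            = fun p => (extend1 base p).filter keep from rfl]
      rw [flatMap_filter_inner, flatMap_filter_filter]
    rw [hfr, foldl_emitB_filter]
    exact ih (L.flatMap (extend1 base)) _


theorem aChain_eq (base extras : List String) :
    ∀ (n r : Nat) (wl : PySem.Set String),
      aChain base extras n (joinAll base r) wl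
        = (List.range n).foldl (fun wl k => (joinAll base (r + 1 + k)).foldl (emitA extras) wl) wl := by
  intro n
  induction n with
  | zero => intro r wl; rfl
  | succ n ih =>
    intro r wl
    show aChain base extras n _ _ = _
    rw [← joinAll_succ, ih (r + 1), List.range_succ_eq_map, List.foldl_cons, List.foldl_map]
    have harg : (fun (wl : PySem.Set String) (k : Nat) =>
          (joinAll base (r + 1 + 1 + k)).foldl (emitA extras) wl)
        = fun wl k => (joinAll base (r + 1 + k.succ)).foldl (emitA extras) wl := by
      funext wl k
      have h : r + 1 + 1 + k = r + 1 + k.succ := by omega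
      rw [h]
    rw [harg]

theorem foldl_congr_fun {α β : Type} (f g : α → β → α) (l : List β) (init : α)
    (h : ∀ a b, f a b = g a b) : l.foldl f init = l.foldl g init := by
  have hfg : f = g := funext fun a => funext fun b => h a b
  rw [hfg]

-- ===== VERDICT (by name: the statement is the Claim_ definition above) =====
theorem generate_big_wordlist_spec : Claim_equal_generate_big_wordlist := by
  intro words extras max_words _
  unfold Spec_generate_big_wordlist generate_big_wordlist generate_big_wordlist_alt
  dsimp only
  set base := words.foldl (fun acc word => acc ++ all_variants word) [] with hbase
  have hinner : ∀ (m : Nat) (wl : PySem.Set String),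
      (pyProduct base m).foldl (fun wl combo =>
        let b := PySem.Str.join "" combo
        if 6 ≤ PySem.Str.len b ∧ PySem.Str.len b ≤ 20 then addExtras extras wl b else wl) wl
        = (joinAll base m).foldl (emitA extras) wl := by
    intro m wl
    unfold joinAll
    rw [List.foldl_map]
    rfl
  have hL : (PySem.List.pyRange 1 (max_words + 1) 1).foldl (fun wl r =>
        (pyProduct base r.toNat).foldl (fun wl combo =>
          let b := PySem.Str.join "" combo
          if 6 ≤ PySem.Str.len b ∧ PySem.Str.len b ≤ 20 then addExtras extras wl b else wl) wl)
        PySem.Set.empty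
      = (List.range max_words.toNat).foldl
          (fun wl k => (joinAll base (0 + 1 + k)).foldl (emitA extras) wl) PySem.Set.empty := by
    rw [PySem.List.pyRange_one, show max_words + 1 - 1 = max_words from by ring, List.foldl_map]
    apply foldl_congr_fun
    intro wl k
    show (pyProduct base ((1 : Int) + (k : Int)).toNat).foldl _ wl = _
    rw [show ((1 : Int) + (k : Int)).toNat = 0 + 1 + k from by omega]
    exact hinner (0 + 1 + k) wl
  have hR : bLoop base extras max_words.toNat PySem.Set.empty [""]
      = aChain base extras max_words.toNat [""] PySem.Set.empty := by
    rw [show ([""] : List String) = List.filter keep [""] from by decide]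
    exact bLoop_eq base extras _ [""] _
  rw [hL, hR, show ([""] : List String) = joinAll base 0 from rfl, aChain_eq]
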